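-- pv_equiv track=rewrite | github.com/MrBrantCode/unitest_baseline | mut_generate/mist_train_cf/cf_91047/solution.py | group_primes
-- ===== SOURCE A (Python) =====
-- def group_primes(numbers):
--     def is_prime(n):
--         if n <= 1:
--             return False
--         for i in range(2, int(n**0.5) + 1):
--             if n % i == 0:
--                 return False
--         return True
--
--     primes = {num: [num] for num in numbers if is_prime(abs(num))}
--     return primes
-- ===== SOURCE B (Python) =====
-- def group_primes(numbers):
--     result = {}
--     if not numbers:
--         return result
--     # largest absolute value present
--     limit = 0
--     for n in numbers:
--         a = -n if n < 0 else n
--         if a > limit: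
--             limit = a
--     # integer square root of limit (no imports in this module)
--     s = 0
--     while (s + 1) * (s + 1) <= limit:
--         s += 1
--     # sieve the small range [0, s]: mark every proper multiple, read off the primes
--     composite = [False] * (s + 1)
--     for p in range(2, s + 1):
--         for m in range(2 * p, s + 1, p):
--             composite[m] = True
--     small_primes = [p for p in range(2, s + 1) if not composite[p]]
--     # second pass: a number is prime iff no small prime up to its square root divides it
--     for num in numbers:
--         a = -num if num < 0 else num
--         if a >= 2 and all(a % p != 0 for p in small_primes if p * p <= a):
--             result[num] = [num]
--     return result
-- ===== Notes on version B (the rewrite author's own statement) =====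
-- stated objective: alternative
-- what changed: Instead of trial division by every integer up to sqrt(n) for each element, B sieves the composites once up to sqrt(max |n|), extracts the small primes, and then tests each number by dividing only by those primes up to its square root.
import Mathlib
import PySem

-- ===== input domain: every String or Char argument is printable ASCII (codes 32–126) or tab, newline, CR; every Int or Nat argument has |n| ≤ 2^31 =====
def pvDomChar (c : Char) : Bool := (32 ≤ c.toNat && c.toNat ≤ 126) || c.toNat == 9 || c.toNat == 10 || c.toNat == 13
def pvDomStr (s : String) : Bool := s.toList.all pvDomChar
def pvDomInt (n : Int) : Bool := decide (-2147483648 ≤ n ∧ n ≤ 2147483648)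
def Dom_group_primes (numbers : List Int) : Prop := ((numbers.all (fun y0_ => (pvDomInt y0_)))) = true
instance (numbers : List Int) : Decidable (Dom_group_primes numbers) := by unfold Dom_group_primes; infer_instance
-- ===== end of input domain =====

-- B replaces A's per-element trial division by every integer up to sqrt(n) with one small sieve up
-- to sqrt(max |n|) plus per-element division by the listed small primes only (same return value, a different cost profile).

-- ===== PORT A =====
-- A's inner helper is_prime; `int(n**0.5)` is ported as Nat.sqrt, exact on the |n| ≤ 2^31 domain
def isPrimeA (n : Int) : Bool :=
  if n ≤ 1 then false
  else !((PySem.List.pyRange 2 ((Nat.sqrt n.toNat : Int) + 1) 1).any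
          (fun i => PySem.Int.mod n i == 0))

-- `{num: [num] for num in numbers if is_prime(abs(num))}`
def group_primes (numbers : List Int) : List (Int × List Int) :=
  (numbers.foldl
    (fun (d : PySem.Dict Int (List Int)) num =>
      if isPrimeA |num| then d.insert num [num] else d)
    PySem.Dict.empty).items

-- ===== PORT B =====
-- Source B's `while (s + 1) * (s + 1) <= limit: s += 1` counting loop (limit ≥ 0 at the call site)
def isqrtLoop (limit : Nat) (s : Nat) : Nat :=
  if h : (s + 1) * (s + 1) ≤ limit then isqrtLoop limit (s + 1) else s
termination_by limit - s
decreasing_by have : s + 1 ≤ (s+1)*(s+1) := Nat.le_mul_of_pos_left _ (by omega); omega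

def group_primes_alt (numbers : List Int) : List (Int × List Int) :=
  if numbers = [] then []
  else
    let limit : Int := numbers.foldl
      (fun limit n =>
        let a := if n < 0 then -n else n
        if a > limit then a else limit) 0
    let s : Nat := isqrtLoop limit.toNat 0
    let composite : Array Bool :=
      (PySem.List.pyRange 2 ((s : Int) + 1) 1).foldl
        (fun comp p =>
          (PySem.List.pyRange (2 * p) ((s : Int) + 1) p).foldl
            (fun comp m => comp.setIfInBounds m.toNat true) comp)
        (Array.replicate (s + 1) false)
    let smallPrimes : List Int :=
      (PySem.List.pyRange 2 ((s : Int) + 1) 1).filter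
        (fun p => !(composite.getD p.toNat false))
    (numbers.foldl
      (fun (d : PySem.Dict Int (List Int)) num =>
        let a := if num < 0 then -num else num
        if 2 ≤ a ∧ ∀ p ∈ smallPrimes, p * p ≤ a → PySem.Int.mod a p ≠ 0
        then d.insert num [num] else d)
      PySem.Dict.empty).items

-- ===== PRECONDITION & SPEC =====
def Spec_group_primes (numbers : List Int) (out : List (Int × List Int)) : Prop := out = group_primes_alt numbers
instance (numbers : List Int) (out : List (Int × List Int)) : Decidable (Spec_group_primes numbers out) := by unfold Spec_group_primes; infer_instance

-- ===== CLAIM (what is proved, stated in full; the proofs are below) =====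
def Claim_equal_group_primes : Prop := ∀ (numbers : List Int), Dom_group_primes numbers → Spec_group_primes numbers (group_primes numbers)

-- ===== LEMMAS AND PROOFS =====
-- A's trial division decides primality of the (nonnegative) argument
theorem isPrimeA_iff (m : Nat) : isPrimeA (m : Int) = true ↔ Nat.Prime m := by
  unfold isPrimeA
  by_cases h1 : (m : Int) ≤ 1
  · simp only [h1, if_pos]
    constructor
    · intro h; exact absurd h (by simp)
    · intro hp; exact absurd hp.two_le (by omega)
  · have h2 : 2 ≤ m := by omega
    simp only [h1, if_neg, not_false_iff, Bool.not_eq_true', List.any_eq_false]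
    rw [Nat.prime_def_le_sqrt]
    constructor
    · intro h
      refine ⟨h2, fun j hj2 hjs hdvd => ?_⟩
      have := h (j : Int) (by
        rw [PySem.List.mem_pyRange_one]
        constructor
        · exact_mod_cast hj2
        · have : (j : Int) < (Nat.sqrt (m : Int).toNat : Int) + 1 := by
            simp only [Int.toNat_natCast]
            exact_mod_cast Nat.lt_succ_of_le hjs
          exact this)
      simp only [beq_iff_eq] at this
      rw [PySem.Int.mod_eq_zero_iff_dvd] at this
      exact this (by exact_mod_cast hdvd)
    · rintro ⟨-, h⟩ i hi
      rw [PySem.List.mem_pyRange_one] at hi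
      simp only [Int.toNat_natCast] at hi
      obtain ⟨hi2, hilt⟩ := hi
      simp only [Bool.not_eq_true, beq_eq_false_iff_ne, ne_eq]
      intro hmod
      rw [PySem.Int.mod_eq_zero_iff_dvd] at hmod
      have hdvd := hmod
      have h0i : 0 ≤ i := by omega
      have : i = (i.toNat : Int) := (Int.toNat_of_nonneg h0i).symm
      apply h i.toNat (by omega) (by omega)
      exact_mod_cast this ▸ hdvd

-- the counting loop computes Nat.sqrt
theorem isqrtLoop_eq (limit s : Nat) (h : s * s ≤ limit) :
    isqrtLoop limit s = Nat.sqrt limit := by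
  fun_induction isqrtLoop limit s with
  | case1 s hlt ih => exact ih hlt
  | case2 s hlt =>
    have h1 : s ≤ Nat.sqrt limit := Nat.le_sqrt.mpr h
    have h2 : Nat.sqrt limit < s + 1 := by
      by_contra hc
      exact hlt (Nat.le_sqrt.mp (by omega))
    omega

-- the marking loops preserve the length of the sieve
theorem markLen (l : List Int) (c : List Bool) :
    (l.foldl (fun c m => c.set m.toNat true) c).length = c.length := by
  induction l generalizing c with
  | nil => rfl
  | cons x t ih => simp [List.foldl_cons, ih, List.length_set]

-- one marking step, cell-wise
theorem setGetD (c : List Bool) (j i : Nat) :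
    (c.set j true).getD i false = (c.getD i false || (decide (j = i) && decide (i < c.length))) := by
  by_cases he : j = i
  · subst he
    by_cases hl : j < c.length
    · simp [List.getD_eq_getElem?_getD, hl]
    · rw [List.set_eq_of_length_le (by omega)]
      simp [hl]
  · simp [List.getD_eq_getElem?_getD, List.getElem?_set_ne he, he]

-- an inner marking loop, cell-wise
theorem markGet (l : List Int) (c : List Bool) (i : Nat) :
    (l.foldl (fun c m => c.set m.toNat true) c).getD i false
      = (c.getD i false || l.any (fun m => decide (m.toNat = i) && decide (i < c.length))) := by
  induction l generalizing c with
  | nil => simp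
  | cons x t ih =>
    simp only [List.foldl_cons, List.any_cons]
    rw [ih, setGetD, Bool.or_assoc]
    simp only [List.length_set]

-- the sieve built by B's nested loops, as a function of the bound s
def sieveOf (s : Nat) : Array Bool :=
  (PySem.List.pyRange 2 ((s : Int) + 1) 1).foldl
    (fun comp p =>
      (PySem.List.pyRange (2 * p) ((s : Int) + 1) p).foldl
        (fun comp m => comp.setIfInBounds m.toNat true) comp)
    (Array.replicate (s + 1) false)

-- the same nested marking loops on the underlying list (the proofs' model of the array)
theorem arr_marks_toList (l : List Int) (a : Array Bool) :
    (l.foldl (fun c m => c.setIfInBounds m.toNat true) a).toList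
      = l.foldl (fun c m => c.set m.toNat true) a.toList := by
  induction l generalizing a with
  | nil => rfl
  | cons x t ih => simp [List.foldl_cons, ih, Array.toList_setIfInBounds]

theorem sieveOf_toList (s : Nat) :
    (sieveOf s).toList =
      (PySem.List.pyRange 2 ((s : Int) + 1) 1).foldl
        (fun comp p =>
          (PySem.List.pyRange (2 * p) ((s : Int) + 1) p).foldl
            (fun comp m => comp.set m.toNat true) comp)
        (List.replicate (s + 1) false) := by
  unfold sieveOf
  generalize PySem.List.pyRange 2 ((s : Int) + 1) 1 = ps
  rw [← Array.toList_replicate (n := s + 1) (a := false)]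
  generalize Array.replicate (s + 1) false = a
  induction ps generalizing a with
  | nil => rfl
  | cons p t ih => rw [List.foldl_cons, List.foldl_cons, ih, arr_marks_toList]

-- the whole nested marking loop, cell-wise
theorem outerGet (ps : List Int) (c : List Bool) (i : Nat) (S : Int) :
    ((ps.foldl (fun comp p => (PySem.List.pyRange (2 * p) S p).foldl
        (fun comp m => comp.set m.toNat true) comp) c)).getD i false
      = (c.getD i false || ps.any (fun p => (PySem.List.pyRange (2 * p) S p).any
          (fun m => decide (m.toNat = i) && decide (i < c.length)))) := by
  induction ps generalizing c with
  | nil => simp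
  | cons p t ih =>
    simp only [List.foldl_cons, List.any_cons]
    rw [ih, markGet, Bool.or_assoc, markLen]

-- sieve cell i (i ≤ s) is set iff i is a product of two factors ≥ 2
theorem sieve_getD (s : Nat) (i : Nat) (hi : i ≤ s) :
    (sieveOf s).getD i false = true ↔ ∃ p k : Nat, 2 ≤ p ∧ 2 ≤ k ∧ p * k = i := by
  rw [show (sieveOf s).getD i false = (sieveOf s).toList.getD i false by
    simp only [Array.getD_eq_getD_getElem?, List.getD_eq_getElem?_getD, Array.getElem?_toList]]
  rw [sieveOf_toList, outerGet]
  simp only [List.getD_eq_getElem?_getD, List.getElem?_getD_replicate_default_eq,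
    List.length_replicate, Bool.false_or, List.any_eq_true]
  constructor
  · rintro ⟨p, hp, hinner⟩
    rw [PySem.List.mem_pyRange_one] at hp
    obtain ⟨hp2, hps⟩ := hp
    obtain ⟨m, hm, hcell⟩ := hinner
    rw [PySem.List.mem_pyRange_iff_of_pos (by omega)] at hm
    obtain ⟨hm1, hm2, t, ht⟩ := hm
    simp only [Bool.and_eq_true, decide_eq_true_eq] at hcell
    obtain ⟨hmeq, hilt⟩ := hcell
    have ht0 : 0 ≤ t := by nlinarith
    refine ⟨p.toNat, (2 + t).toNat, by omega, by omega, ?_⟩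
    have hcast : ((p.toNat * (2 + t).toNat : Nat) : Int) = m := by
      push_cast
      rw [Int.toNat_of_nonneg (by omega : (0:Int) ≤ p), Int.toNat_of_nonneg (by omega : (0:Int) ≤ 2 + t)]
      calc p * (2 + t) = 2 * p + p * t := by ring
        _ = m := by omega
    have h2 := congrArg Int.toNat hcast
    rw [Int.toNat_natCast, hmeq] at h2
    exact h2
  · rintro ⟨p, k, hp2, hk2, he⟩
    refine ⟨(p : Int), ?_, ?_⟩
    · rw [PySem.List.mem_pyRange_one]
      have hplei : p ≤ i := he ▸ Nat.le_mul_of_pos_right p (by omega)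
      constructor
      · exact_mod_cast hp2
      · have hps : p ≤ s := le_trans hplei hi
        exact_mod_cast Nat.lt_succ_of_le hps
    · refine ⟨((p * k : Nat) : Int), ?_, ?_⟩
      · rw [PySem.List.mem_pyRange_iff_of_pos (by exact_mod_cast Nat.lt_of_lt_of_le (by omega) hp2)]
        refine ⟨?_, ?_, ?_⟩
        · push_cast
          nlinarith [hp2, hk2]
        · rw [he]; exact_mod_cast Nat.lt_succ_of_le hi
        · push_cast
          exact ⟨(k : Int) - 2, by ring⟩
      · simp only [Bool.and_eq_true, decide_eq_true_eq]
        exact ⟨by simp [he], by omega⟩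

-- a number ≥ 2 splits into two factors ≥ 2 iff it is not prime
theorem factor_iff_not_prime (i : Nat) (hi : 2 ≤ i) :
    (∃ p k : Nat, 2 ≤ p ∧ 2 ≤ k ∧ p * k = i) ↔ ¬ Nat.Prime i := by
  constructor
  · rintro ⟨p, k, hp, hk, he⟩ hprime
    rcases hprime.eq_one_or_self_of_dvd p ⟨k, he.symm⟩ with h1 | hs
    · omega
    · nlinarith
  · intro hnp
    have hprod := Nat.mul_div_cancel' i.minFac_dvd
    refine ⟨i.minFac, i / i.minFac, (Nat.minFac_prime (by omega)).two_le, ?_, hprod⟩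
    rcases Nat.lt_or_ge (i / i.minFac) 2 with h | h
    · interval_cases h' : (i / i.minFac)
      · rw [Nat.mul_zero] at hprod; omega
      · rw [Nat.mul_one] at hprod
        exact absurd (hprod ▸ Nat.minFac_prime (by omega : i ≠ 1)) hnp
    · exact h

-- B's per-element test decides primality, given a prime list covering sqrt of the value
theorem bCond_iff (sp : List Int) (m : Nat)
    (hcov : ∀ q : Nat, Nat.Prime q → q * q ≤ m → (q : Int) ∈ sp)
    (hge : ∀ p ∈ sp, 2 ≤ p) :
    (2 ≤ (m : Int) ∧ ∀ p ∈ sp, p * p ≤ (m : Int) → PySem.Int.mod (m : Int) p ≠ 0) ↔ Nat.Prime m := by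
  constructor
  · rintro ⟨h2, hall⟩
    by_contra hnp
    have hm2 : 2 ≤ m := by exact_mod_cast h2
    have hq := Nat.minFac_prime (by omega : m ≠ 1)
    have hqsq : m.minFac * m.minFac ≤ m := by
      have := Nat.minFac_sq_le_self (by omega) hnp
      simpa [pow_two] using this
    have hmem := hcov m.minFac hq hqsq
    refine hall _ hmem (by exact_mod_cast hqsq) ?_
    rw [PySem.Int.mod_eq_zero_iff_dvd]
    exact_mod_cast Int.natCast_dvd_natCast.mpr (Nat.minFac_dvd m)
  · intro hp
    refine ⟨by exact_mod_cast hp.two_le, fun p hmem hsq hmod => ?_⟩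
    rw [PySem.Int.mod_eq_zero_iff_dvd] at hmod
    have hp2 : (2 : Int) ≤ p := hge p hmem
    have hpn : p = (p.toNat : Int) := (Int.toNat_of_nonneg (by omega)).symm
    have hdvd : p.toNat ∣ m := by rw [hpn] at hmod; exact_mod_cast hmod
    rcases hp.eq_one_or_self_of_dvd _ hdvd with h1 | hm
    · have : (2 : Int) ≤ (p.toNat : Int) := hpn ▸ hp2
      omega
    · have hmm : (m : Int) * m ≤ m := by rw [hpn, hm] at hsq; exact_mod_cast hsq
      have h2m := hp.two_le
      nlinarith

-- B's running-maximum loop, named for the proofs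
def limOf (numbers : List Int) : Int :=
  numbers.foldl
    (fun limit n =>
      let a := if n < 0 then -n else n
      if a > limit then a else limit) 0

def sOf (numbers : List Int) : Nat := isqrtLoop (limOf numbers).toNat 0

-- B's small-prime list, named for the proofs
def spOf (s : Nat) : List Int :=
  (PySem.List.pyRange 2 ((s : Int) + 1) 1).filter
    (fun p => !((sieveOf s).getD p.toNat false))

-- the small-prime list holds exactly the primes in [2, s]
theorem mem_smallPrimes (s : Nat) (p : Int) :
    p ∈ spOf s ↔ 2 ≤ p ∧ p ≤ (s : Int) ∧ Nat.Prime p.toNat := by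
  unfold spOf
  rw [List.mem_filter, PySem.List.mem_pyRange_one, Bool.not_eq_eq_eq_not, Bool.not_true,
    ← Bool.not_eq_true]
  constructor
  · rintro ⟨⟨h2, hlt⟩, hcell⟩
    rw [sieve_getD s p.toNat (by omega)] at hcell
    rw [factor_iff_not_prime p.toNat (by omega)] at hcell
    exact ⟨h2, by omega, not_not.mp hcell⟩
  · rintro ⟨h2, hle, hp⟩
    refine ⟨⟨h2, by omega⟩, ?_⟩
    rw [sieve_getD s p.toNat (by omega)]
    exact fun hf => (factor_iff_not_prime p.toNat (by omega)).mp hf hp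

-- the running maximum bounds every |num|
theorem limOf_spec (numbers : List Int) :
    0 ≤ limOf numbers ∧ ∀ num ∈ numbers, |num| ≤ limOf numbers := by
  unfold limOf
  have hrw : numbers.foldl
      (fun limit n => let a := if n < 0 then -n else n; if a > limit then a else limit) 0
      = numbers.foldl (fun acc n => max acc (if n < 0 then -n else n)) 0 := by
    apply PySem.List.foldl_congr_mem
    intro acc x _
    simp only
    rcases le_or_gt (if x < 0 then -x else x) acc with h | h
    · rw [if_neg (not_lt.mpr h), max_eq_left h]
    · rw [if_pos h, max_eq_right h.le]
  rw [hrw]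
  obtain ⟨h1, h2⟩ := PySem.List.le_foldl_max_int numbers (fun n => if n < 0 then -n else n) 0
  refine ⟨h1, fun num hmem => ?_⟩
  have h3 := h2 num hmem
  have habs : (if num < 0 then -num else num) = |num| := by
    split_ifs with h
    · exact (abs_of_neg h).symm
    · exact (abs_of_nonneg (le_of_not_gt h)).symm
  rwa [habs] at h3

-- B with its let-chain named
theorem alt_eq (numbers : List Int) (h : ¬ numbers = []) :
    group_primes_alt numbers =
      (numbers.foldl
        (fun (d : PySem.Dict Int (List Int)) num =>
          let a := if num < 0 then -num else num
          if 2 ≤ a ∧ ∀ p ∈ spOf (sOf numbers), p * p ≤ a → PySem.Int.mod a p ≠ 0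
          then d.insert num [num] else d)
        PySem.Dict.empty).items := by
  unfold group_primes_alt
  rw [if_neg h]
  rfl

-- the two ports agree on every input
theorem group_primes_spec' (numbers : List Int) : group_primes numbers = group_primes_alt numbers := by
  by_cases hnil : numbers = []
  · subst hnil; rfl
  · rw [alt_eq numbers hnil]
    unfold group_primes
    congr 1
    apply PySem.List.foldl_congr_mem
    intro d num hmem
    simp only
    obtain ⟨hlim0, hlim⟩ := limOf_spec numbers
    have hble : |num| ≤ limOf numbers := hlim num hmem
    have habs : |num| = (num.natAbs : Int) := (Int.abs_eq_natAbs num)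
    have ha : (if num < 0 then -num else num) = (num.natAbs : Int) := by
      rw [← habs]
      split_ifs with h
      · exact (abs_of_neg h).symm
      · exact (abs_of_nonneg (le_of_not_gt h)).symm
    rw [ha, habs]
    set m := num.natAbs with hm
    have hs : sOf numbers = Nat.sqrt (limOf numbers).toNat := by
      unfold sOf
      exact isqrtLoop_eq _ _ (by omega)
    have hmlim : m ≤ (limOf numbers).toNat := by
      rw [habs] at hble
      omega
    have hcond : (2 ≤ (m : Int) ∧ ∀ p ∈ spOf (sOf numbers),
        p * p ≤ (m : Int) → PySem.Int.mod (m : Int) p ≠ 0) ↔ Nat.Prime m := by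
      apply bCond_iff
      · intro q hq hqq
        rw [mem_smallPrimes]
        refine ⟨by exact_mod_cast hq.two_le, ?_, by simpa using hq⟩
        rw [hs]
        exact_mod_cast Nat.le_sqrt.mpr (le_trans hqq hmlim)
      · intro p hp
        exact ((mem_smallPrimes _ _).mp hp).1
    by_cases hP : Nat.Prime m
    · rw [if_pos ((isPrimeA_iff m).mpr hP), if_pos (hcond.mpr hP)]
    · rw [if_neg (fun hc => hP ((isPrimeA_iff m).mp hc)),
        if_neg (fun hc => hP (hcond.mp hc))]

-- ===== VERDICT (by name: the statement is the Claim_ definition above) =====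
theorem group_primes_spec : Claim_equal_group_primes := by
  intro numbers _
  exact group_primes_spec' numbers
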